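-- pv_equiv track=rewrite | github.com/venico19/leetcode | others/pick_drop_permutation.py | trip
-- ===== SOURCE A (Python) =====
-- def trip(l):
--     n = len(l)
--     res = []
--
--     def permutation(start, prev):
--         if start == n:
--             res.append(prev)
--             return
--         [pickup, dropoff] = l[start]
--         k = len(prev)
--         for i in range(k+1):
--             for j in range(i, k+1):
--                 ans = prev[:i] + [pickup] + prev[i:j] + [dropoff] + prev[j:]
--                 permutation(start + 1, ans)
--
--     permutation(0, [])
--     return res
-- ===== SOURCE B (Python) =====
-- def trip(l):
--     partials = [[]]
--     for pickup, dropoff in l: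
--         partials = [p[:i] + [pickup] + p[i:j] + [dropoff] + p[j:]
--                     for p in partials
--                     for i in range(len(p) + 1)
--                     for j in range(i, len(p) + 1)]
--     return partials
-- ===== Notes on version B (the rewrite author's own statement) =====
-- stated objective: simpler
-- what changed: Replaces the recursive DFS helper with a mutable result list by an iterative left fold: a list of partial orderings is rebuilt for each trip via one nested comprehension over insertion positions.
import Mathlib
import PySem

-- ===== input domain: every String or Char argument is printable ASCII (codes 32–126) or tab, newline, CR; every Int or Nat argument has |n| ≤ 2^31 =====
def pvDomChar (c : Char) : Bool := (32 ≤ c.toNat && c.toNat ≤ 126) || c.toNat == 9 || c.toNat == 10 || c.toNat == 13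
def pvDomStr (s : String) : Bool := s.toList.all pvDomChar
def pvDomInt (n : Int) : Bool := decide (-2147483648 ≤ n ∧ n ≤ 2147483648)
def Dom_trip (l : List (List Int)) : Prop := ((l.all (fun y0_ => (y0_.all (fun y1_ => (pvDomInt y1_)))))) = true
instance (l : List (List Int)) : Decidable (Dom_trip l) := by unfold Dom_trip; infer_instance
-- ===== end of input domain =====

-- B replaces A's recursive DFS helper (mutable res) by an iterative fold that rebuilds the
-- list of partial orderings for each trip; objective: simpler.


-- ===== PORT A =====
-- A's recursive helper `permutation(start, prev)`: instead of indexing l[start] we recurse on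
-- the tail of l (same values in the same order); the shared mutable `res` becomes the returned
-- list, appends become `++` in the same order. `[pickup, dropoff] = l[start]` raises ValueError
-- on an element whose length is not 2 — those inputs are excluded by Pre_trip (the `_ => []`
-- branch is never reached under Pre_trip).
def tripGo (rest : List (List Int)) (prev : List Int) : List (List Int) :=
  match rest with
  | [] => [prev]
  | pair :: rest' =>
    match pair with
    | [pickup, dropoff] =>
      let k : Int := (prev.length : Int)
      (PySem.List.pyRange 0 (k + 1) 1).foldl (fun res i =>
        (PySem.List.pyRange i (k + 1) 1).foldl (fun res j =>
          res ++ tripGo rest'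
            (PySem.List.slice prev none (some i) ++ [pickup] ++
             PySem.List.slice prev (some i) (some j) ++ [dropoff] ++
             PySem.List.slice prev (some j) none)) res) []
    | _ => []

def trip (l : List (List Int)) : List (List Int) := tripGo l []

-- ===== PORT B =====
-- One step of B's fold: the comprehension over p, i, j for one [pickup, dropoff] pair.
def tripStep (partials : List (List Int)) (pair : List Int) : List (List Int) :=
  match pair with
  | [pickup, dropoff] =>
    partials.flatMap (fun p =>
      (List.range (p.length + 1)).flatMap (fun i =>
        (List.range' i (p.length + 1 - i)).map (fun j =>
          p.take i ++ [pickup] ++ ((p.drop i).take (j - i)) ++ [dropoff] ++ p.drop j)))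
  | _ => []

def trip_alt (l : List (List Int)) : List (List Int) := l.foldl tripStep [[]]

-- ===== PRECONDITION & SPEC =====
-- Pre_trip excludes exactly the inputs on which Python A raises ValueError: an element of l
-- that is not a two-element list fails the unpacking `[pickup, dropoff] = l[start]`.
def Pre_trip (l : List (List Int)) : Prop := ∀ x ∈ l, x.length = 2
instance (l : List (List Int)) : Decidable (Pre_trip l) := by unfold Pre_trip; infer_instance
def pvWitness_trip : List (List Int) := [[1, 2], [3, 4]]
def Spec_trip (l : List (List Int)) (out : List (List Int)) : Prop := out = trip_alt l
instance (l : List (List Int)) (out : List (List Int)) : Decidable (Spec_trip l out) := by unfold Spec_trip; infer_instance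

-- ===== CLAIM (what is proved, stated in full; the proofs are below) =====
def Claim_equal_trip : Prop := ∀ (l : List (List Int)), Dom_trip l → Pre_trip l → Spec_trip l (trip l)

-- ===== LEMMAS AND PROOFS =====

-- (map f l).flatMap g = l.flatMap (g ∘ f), in the applied form the goals take.
theorem flatMap_map' {α β γ : Type} (l : List α) (f : α → β) (g : β → List γ) :
    (l.map f).flatMap g = l.flatMap (fun x => g (f x)) := by
  rw [List.flatMap_def, List.map_map, ← List.flatMap_def]; rfl

-- A's nested index loops over insertion positions, flattened: tripGo on a cons is the flatMap
-- of tripGo over B's per-pair expansion of prev.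
theorem tripGo_cons (pair : List Int) (rest : List (List Int)) (prev : List Int) :
    tripGo (pair :: rest) prev = (tripStep [prev] pair).flatMap (tripGo rest) := by
  match pair with
  | [pickup, dropoff] =>
    simp only [tripGo, tripStep, List.flatMap_cons, List.flatMap_nil, List.append_nil]
    simp only [PySem.List.foldl_append_eq_flatMap, List.nil_append]
    rw [List.flatMap_assoc, PySem.List.pyRange_one 0 ((prev.length : Int) + 1)]
    have hlen : ((prev.length : Int) + 1 - 0).toNat = prev.length + 1 := by omega
    rw [hlen, flatMap_map']
    apply List.flatMap_congr
    intro i hi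
    have hik : i ≤ prev.length := by
      have := List.mem_range.mp hi; omega
    rw [flatMap_map', PySem.List.pyRange_one (0 + (i : Int)) ((prev.length : Int) + 1)]
    have hlen2 : ((prev.length : Int) + 1 - (0 + (i : Int))).toNat = prev.length + 1 - i := by
      omega
    rw [hlen2, flatMap_map', List.range'_eq_map_range, flatMap_map']
    apply List.flatMap_congr
    intro t _
    have h1 : (0 : Int) + (i : Int) = ((i : Nat) : Int) := by ring
    have h2 : (i : Int) + (t : Int) = (((i + t : Nat)) : Int) := by push_cast; ring
    rw [h1, h2, PySem.List.slice_to_natCast, PySem.List.slice_natCast,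
        PySem.List.slice_from_natCast]
  | [] => simp [tripGo, tripStep]
  | [x] => simp [tripGo, tripStep]
  | x :: y :: z :: t => simp [tripGo, tripStep]

-- One B step splits as a flatMap over single partials.
theorem tripStep_flatMap (partials : List (List Int)) (pair : List Int) :
    tripStep partials pair = partials.flatMap (fun p => tripStep [p] pair) := by
  match pair with
  | [pickup, dropoff] =>
    simp only [tripStep, List.flatMap_cons, List.flatMap_nil, List.append_nil]
  | [] => simp [tripStep]
  | [x] => simp [tripStep]
  | x :: y :: z :: t => simp [tripStep]

theorem foldl_tripStep_eq (rest : List (List Int)) (partials : List (List Int)) :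
    List.foldl tripStep partials rest = partials.flatMap (tripGo rest) := by
  induction rest generalizing partials with
  | nil => simp [tripGo]
  | cons pair rest ih =>
    rw [List.foldl_cons, ih, tripStep_flatMap, List.flatMap_assoc]
    apply List.flatMap_congr
    intro p _
    exact (tripGo_cons pair rest p).symm

-- ===== VERDICT (by name: the statement is the Claim_ definition above) =====
theorem trip_spec : Claim_equal_trip := by
  intro l _ _
  unfold Spec_trip trip trip_alt
  rw [foldl_tripStep_eq]
  simp
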